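-- pv_equiv track=rewrite | github.com/axel-douglas/space-trash-hack | app/modules/mars_control.py | _material_group_key
-- ===== SOURCE A (Python) =====
-- from collections.abc import Iterable, Mapping, MutableMapping, Sequence
-- from typing import Any, Final
--
-- def _material_group_key(record: Mapping[str, Any]) -> str:
--     category = str(record.get("category") or "").lower()
--     family = str(record.get("material_family") or "").lower()
--     flags = str(record.get("flags") or "").lower()
--     key_materials = str(record.get("key_materials") or "").lower()
--     tokens = " ".join([category, family, flags, key_materials])
--
--     if "foam" in tokens or "pvdf" in tokens:
--         return "espumas"
--     if any(term in tokens for term in ("textile", "fabric", "cotton", "nomex", "garment", "towel")):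
--         return "textiles"
--     if any(term in tokens for term in ("alloy", "aluminium", "titanium", "steel", "structural", "strut")):
--         return "metales"
--     if any(term in tokens for term in ("poly", "plastic", "polymer", "eva")):
--         return "polimeros"
--     return "mixtos"
-- ===== SOURCE B (Python) =====
-- _KEYWORDS = {
--     "foam": (0, "espumas"), "pvdf": (0, "espumas"),
--     "textile": (1, "textiles"), "fabric": (1, "textiles"), "cotton": (1, "textiles"),
--     "nomex": (1, "textiles"), "garment": (1, "textiles"), "towel": (1, "textiles"),
--     "alloy": (2, "metales"), "aluminium": (2, "metales"), "titanium": (2, "metales"),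
--     "steel": (2, "metales"), "structural": (2, "metales"), "strut": (2, "metales"),
--     "poly": (3, "polimeros"), "plastic": (3, "polimeros"), "polymer": (3, "polimeros"),
--     "eva": (3, "polimeros"),
-- }
--
-- def _material_group_key(record):
--     category = str(record.get("category") or "").lower()
--     family = str(record.get("material_family") or "").lower()
--     flags = str(record.get("flags") or "").lower()
--     key_materials = str(record.get("key_materials") or "").lower()
--     tokens = " ".join([category, family, flags, key_materials])
--     rank, label = 4, "mixtos"
--     for term, (r, lab) in _KEYWORDS.items():
--         if term in tokens and r < rank:
--             rank, label = r, lab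
--     return label
-- ===== Notes on version B (the rewrite author's own statement) =====
-- stated objective: alternative
-- what changed: Replaces the ordered early-return branch chain with a single min-reduction: every keyword carries a (priority, label) pair in one map, and one accumulator pass keeps the lowest-priority matching keyword's label.
import Mathlib
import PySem

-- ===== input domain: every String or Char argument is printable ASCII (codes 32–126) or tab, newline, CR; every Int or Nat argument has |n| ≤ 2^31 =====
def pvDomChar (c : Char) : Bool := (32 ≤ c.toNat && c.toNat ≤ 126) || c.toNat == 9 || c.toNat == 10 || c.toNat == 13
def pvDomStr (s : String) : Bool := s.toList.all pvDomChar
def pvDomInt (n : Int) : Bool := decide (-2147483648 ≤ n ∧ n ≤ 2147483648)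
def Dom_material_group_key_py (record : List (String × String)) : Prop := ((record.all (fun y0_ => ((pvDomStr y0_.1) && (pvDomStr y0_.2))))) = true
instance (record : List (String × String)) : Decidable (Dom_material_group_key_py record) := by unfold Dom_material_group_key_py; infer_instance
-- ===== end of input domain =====

-- B replaces A's ordered early-return branch chain by a single min-accumulator pass over a keyword -> (priority, label) map; alternative decomposition, same results.


-- ===== PORT A =====
def material_group_key_py (record : List (String × String)) : String :=
  let category := PySem.Str.lower ((PySem.Dict.mk record).getD "category" "")
  let family := PySem.Str.lower ((PySem.Dict.mk record).getD "material_family" "")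
  let flags := PySem.Str.lower ((PySem.Dict.mk record).getD "flags" "")
  let key_materials := PySem.Str.lower ((PySem.Dict.mk record).getD "key_materials" "")
  let tokens := PySem.Str.join " " [category, family, flags, key_materials]
  if PySem.Str.isIn "foam" tokens || PySem.Str.isIn "pvdf" tokens then "espumas"
  else if ["textile", "fabric", "cotton", "nomex", "garment", "towel"].any (fun term => PySem.Str.isIn term tokens) then "textiles"
  else if ["alloy", "aluminium", "titanium", "steel", "structural", "strut"].any (fun term => PySem.Str.isIn term tokens) then "metales"
  else if ["poly", "plastic", "polymer", "eva"].any (fun term => PySem.Str.isIn term tokens) then "polimeros"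
  else "mixtos"

-- ===== PORT B =====
-- Source B's _KEYWORDS map: keyword -> (priority, label), in insertion order
def pvKeywords : List (String × Nat × String) :=
  [("foam", 0, "espumas"), ("pvdf", 0, "espumas"),
   ("textile", 1, "textiles"), ("fabric", 1, "textiles"), ("cotton", 1, "textiles"),
   ("nomex", 1, "textiles"), ("garment", 1, "textiles"), ("towel", 1, "textiles"),
   ("alloy", 2, "metales"), ("aluminium", 2, "metales"), ("titanium", 2, "metales"),
   ("steel", 2, "metales"), ("structural", 2, "metales"), ("strut", 2, "metales"),
   ("poly", 3, "polimeros"), ("plastic", 3, "polimeros"), ("polymer", 3, "polimeros"),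
   ("eva", 3, "polimeros")]

-- Source B's loop body: keep the (rank, label) of the lowest-rank keyword seen so far that occurs in tokens
def pvStep (tokens : String) (acc : Nat × String) (kw : String × Nat × String) : Nat × String :=
  if PySem.Str.isIn kw.1 tokens && decide (kw.2.1 < acc.1) then (kw.2.1, kw.2.2) else acc

def material_group_key_py_alt (record : List (String × String)) : String :=
  let category := PySem.Str.lower ((PySem.Dict.mk record).getD "category" "")
  let family := PySem.Str.lower ((PySem.Dict.mk record).getD "material_family" "")
  let flags := PySem.Str.lower ((PySem.Dict.mk record).getD "flags" "")
  let key_materials := PySem.Str.lower ((PySem.Dict.mk record).getD "key_materials" "")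
  let tokens := PySem.Str.join " " [category, family, flags, key_materials]
  (pvKeywords.foldl (pvStep tokens) (4, "mixtos")).2

-- ===== PRECONDITION & SPEC =====
def Spec_material_group_key_py (record : List (String × String)) (out : String) : Prop := out = material_group_key_py_alt record
instance (record : List (String × String)) (out : String) : Decidable (Spec_material_group_key_py record out) := by unfold Spec_material_group_key_py; infer_instance

-- ===== CLAIM (what is proved, stated in full; the proofs are below) =====
def Claim_equal_material_group_key_py : Prop := ∀ (record : List (String × String)), Dom_material_group_key_py record → Spec_material_group_key_py record (material_group_key_py record)

-- ===== LEMMAS AND PROOFS =====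

-- one rank-homogeneous group of the keyword table: the fold updates the accumulator
-- iff some keyword of the group occurs in tokens and the group's rank beats the accumulator
theorem pv_fold_group (tokens : String) (ts : List String) (r : Nat) (l : String) (acc : Nat × String) :
    (ts.map (fun t => (t, r, l))).foldl (pvStep tokens) acc
      = if ts.any (fun t => PySem.Str.isIn t tokens) && decide (r < acc.1) then (r, l) else acc := by
  induction ts generalizing acc with
  | nil => simp
  | cons t ts ih =>
    simp only [List.map_cons, List.foldl_cons, List.any_cons]
    rw [ih]
    unfold pvStep
    dsimp only
    rcases Bool.eq_false_or_eq_true (PySem.Str.isIn t tokens) with h1 | h1 <;>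
      rcases Bool.eq_false_or_eq_true (ts.any fun t => PySem.Str.isIn t tokens) with h2 | h2 <;>
      simp only [h1, h2] <;> by_cases h3 : r < acc.1 <;> simp [h3]

-- the keyword table is the concatenation of its four rank-homogeneous groups
theorem pv_keywords_eq :
    pvKeywords
      = (["foam", "pvdf"].map (fun t => (t, 0, "espumas")))
        ++ (["textile", "fabric", "cotton", "nomex", "garment", "towel"].map (fun t => (t, 1, "textiles")))
        ++ (["alloy", "aluminium", "titanium", "steel", "structural", "strut"].map (fun t => (t, 2, "metales")))
        ++ (["poly", "plastic", "polymer", "eva"].map (fun t => (t, 3, "polimeros"))) := by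
  rfl

-- ===== VERDICT (by name: the statement is the Claim_ definition above) =====
theorem material_group_key_py_spec : Claim_equal_material_group_key_py := by
  intro record _
  unfold Spec_material_group_key_py material_group_key_py material_group_key_py_alt
  rw [pv_keywords_eq]
  simp only [List.foldl_append, pv_fold_group]
  set tokens := PySem.Str.join " "
    [PySem.Str.lower ((PySem.Dict.mk record).getD "category" ""),
     PySem.Str.lower ((PySem.Dict.mk record).getD "material_family" ""),
     PySem.Str.lower ((PySem.Dict.mk record).getD "flags" ""),
     PySem.Str.lower ((PySem.Dict.mk record).getD "key_materials" "")] with htok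
  by_cases g0 : (["foam", "pvdf"].any (fun t => PySem.Str.isIn t tokens)) = true <;>
  by_cases g1 : (["textile", "fabric", "cotton", "nomex", "garment", "towel"].any (fun t => PySem.Str.isIn t tokens)) = true <;>
  by_cases g2 : (["alloy", "aluminium", "titanium", "steel", "structural", "strut"].any (fun t => PySem.Str.isIn t tokens)) = true <;>
  by_cases g3 : (["poly", "plastic", "polymer", "eva"].any (fun t => PySem.Str.isIn t tokens)) = true <;>
  simp_all [List.any_cons]
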